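-- pv_equiv track=rewrite | github.com/Haroong/Algorithm | BaekJoon Online Judge/4659.py | checkCondition3
-- ===== SOURCE A (Python) =====
-- def checkCondition3(password):
--     prev = password[0]
--     for p in password[1:]:
--         if p == prev:  # 같은 글자가 연속적으로 위치
--             if (p == 'e' and prev == 'e' or p == 'o' and prev == 'o'):
--                 continue  # ee, oo 허용
--             else:
--                 return False
--         else:
--             prev = p
-- ===== SOURCE B (Python) =====
-- def checkCondition3(password):
--     if any(c not in 'eo' and c + c in password for c in set(password)):
--         return False
-- ===== Notes on version B (the rewrite author's own statement) =====
-- stated objective: alternative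
-- what changed: Replaces A's stateful left-to-right scan with a prev variable by a per-character membership test: for each distinct character that is not one of the two letters allowed to repeat, check whether its doubled form occurs as a substring of the password.
import Mathlib
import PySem

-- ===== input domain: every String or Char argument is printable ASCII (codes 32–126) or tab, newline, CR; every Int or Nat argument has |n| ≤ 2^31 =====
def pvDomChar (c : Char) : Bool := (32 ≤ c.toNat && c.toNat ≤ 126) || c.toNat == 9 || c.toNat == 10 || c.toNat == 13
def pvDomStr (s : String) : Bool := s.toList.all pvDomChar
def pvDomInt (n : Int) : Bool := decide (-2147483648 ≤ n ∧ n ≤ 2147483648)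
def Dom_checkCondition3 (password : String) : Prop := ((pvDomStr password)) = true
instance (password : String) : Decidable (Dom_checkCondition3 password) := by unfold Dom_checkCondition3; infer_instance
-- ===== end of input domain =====

-- B replaces A's stateful prev-variable scan by a per-distinct-character doubled-substring test
-- (alternative decomposition, same results); on the empty string A raises IndexError (excluded by Pre_)
-- and B returns None.

-- ===== PORT A =====
-- loop over password[1:] with state prev; 'continue' keeps prev, else-branch updates it
def checkCondition3Go (l : List Char) (prev : Char) : Option Bool :=
  match l with
  | [] => none
  | p :: ps =>
    if p = prev then
      if (p = 'e' ∧ prev = 'e') ∨ (p = 'o' ∧ prev = 'o') then checkCondition3Go ps prev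
      else some false
    else checkCondition3Go ps p

def checkCondition3 (password : String) : Option Bool :=
  match password.toList with
  | [] => none   -- password[0] raises IndexError here; excluded by Pre_
  | c :: rest => checkCondition3Go rest c

-- ===== PORT B =====
-- 'c not in "eo" and c + c in password' for one candidate character c
def pvDoubled (l : List Char) (c : Char) : Bool :=
  !(PySem.Chars.isIn [c] ['e', 'o']) && PySem.Chars.isIn [c, c] l

def checkCondition3_alt (password : String) : Option Bool :=
  if (PySem.Set.ofList password.toList).any (pvDoubled password.toList) then some false
  else none

-- ===== PRECONDITION & SPEC =====
-- Pre_ excludes only the empty string, on which A raises IndexError.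
def Pre_checkCondition3 (password : String) : Prop := password ≠ ""
instance (password : String) : Decidable (Pre_checkCondition3 password) := by unfold Pre_checkCondition3; infer_instance
def pvWitness_checkCondition3 : String := "hello"

def Spec_checkCondition3 (password : String) (out : Option Bool) : Prop := out = checkCondition3_alt password
instance (password : String) (out : Option Bool) : Decidable (Spec_checkCondition3 password out) := by unfold Spec_checkCondition3; infer_instance

-- ===== CLAIM (what is proved, stated in full; the proofs are below) =====
def Claim_equal_checkCondition3 : Prop := ∀ (password : String), Dom_checkCondition3 password → Pre_checkCondition3 password → Spec_checkCondition3 password (checkCondition3 password)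

-- ===== LEMMAS AND PROOFS =====

-- the common specification: some non-ee/oo character occurs doubled
def HasBadDouble (l : List Char) : Prop := ∃ c, c ≠ 'e' ∧ c ≠ 'o' ∧ [c, c] <:+: l

-- A's loop returns only none or some false
lemma go_ne_some_true (l : List Char) (prev : Char) : checkCondition3Go l prev ≠ some true := by
  induction l generalizing prev with
  | nil => simp [checkCondition3Go]
  | cons p ps ih =>
    simp only [checkCondition3Go]
    split_ifs <;> simp [ih]

lemma badDouble_cons_iff (a : Char) (l : List Char) :
    HasBadDouble (a :: l) ↔ (a ≠ 'e' ∧ a ≠ 'o' ∧ l.head? = some a) ∨ HasBadDouble l := by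
  constructor
  · rintro ⟨c, he, ho, hinf⟩
    rcases List.infix_cons_iff.mp hinf with hpre | hinf'
    · cases l with
      | nil => exact absurd hpre.length_le (by simp)
      | cons b t =>
        rcases List.cons_prefix_cons.mp hpre with ⟨rfl, hpre2⟩
        rcases List.cons_prefix_cons.mp hpre2 with ⟨rfl, -⟩
        exact Or.inl ⟨he, ho, rfl⟩
    · exact Or.inr ⟨c, he, ho, hinf'⟩
  · rintro (⟨he, ho, hhd⟩ | ⟨c, he, ho, hinf⟩)
    · cases l with
      | nil => simp at hhd
      | cons b t =>
        simp only [List.head?_cons, Option.some.injEq] at hhd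
        subst hhd
        exact ⟨b, he, ho, ⟨[], t, by simp⟩⟩
    · exact ⟨c, he, ho, hinf.trans (List.suffix_cons a l).isInfix⟩

-- A's loop finds a bad double iff one exists in prev :: l
lemma go_eq_some_false_iff (l : List Char) (prev : Char) :
    checkCondition3Go l prev = some false ↔ HasBadDouble (prev :: l) := by
  induction l generalizing prev with
  | nil =>
    simp only [checkCondition3Go]
    constructor
    · intro h; cases h
    · rintro ⟨c, -, -, hinf⟩
      exact absurd hinf.length_le (by simp)
  | cons p ps ih =>
    simp only [checkCondition3Go]
    by_cases hpp : p = prev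
    · subst hpp
      by_cases heo : (p = 'e' ∧ p = 'e') ∨ (p = 'o' ∧ p = 'o')
      · have hpe : p = 'e' ∨ p = 'o' := by
          rcases heo with ⟨h, -⟩ | ⟨h, -⟩
          · exact Or.inl h
          · exact Or.inr h
        rw [if_pos rfl, if_pos heo, ih, badDouble_cons_iff p (p :: ps)]
        constructor
        · exact Or.inr
        · rintro (⟨he, ho, -⟩ | h)
          · rcases hpe with h | h
            · exact absurd h he
            · exact absurd h ho
          · exact h
      · have h1 : ¬ p = 'e' := fun h => heo (Or.inl ⟨h, h⟩)
        have h2 : ¬ p = 'o' := fun h => heo (Or.inr ⟨h, h⟩)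
        rw [if_pos rfl, if_neg heo]
        simp only [true_iff]
        exact ⟨p, h1, h2, ⟨[], ps, by simp⟩⟩
    · rw [if_neg hpp, ih, badDouble_cons_iff prev (p :: ps)]
      constructor
      · exact Or.inr
      · rintro (⟨-, -, hhd⟩ | h)
        · simp only [List.head?_cons, Option.some.injEq] at hhd
          exact absurd hhd hpp
        · exact h

-- B's boolean finds a bad double iff one exists
lemma alt_any_iff (l : List Char) :
    (PySem.Set.ofList l).any (pvDoubled l) = true ↔ HasBadDouble l := by
  rw [List.any_eq_true]
  constructor
  · rintro ⟨c, -, hc⟩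
    simp only [pvDoubled, Bool.and_eq_true, Bool.not_eq_true'] at hc
    obtain ⟨hno, hin⟩ := hc
    have hinf := (PySem.Chars.isIn_iff_infix _ _).mp hin
    have hno' : ¬ [c] <:+: ['e', 'o'] := (PySem.Chars.isIn_eq_false_iff _ _).mp hno
    refine ⟨c, ?_, ?_, hinf⟩
    · rintro rfl; exact hno' ⟨[], ['o'], rfl⟩
    · rintro rfl; exact hno' ⟨['e'], [], rfl⟩
  · rintro ⟨c, he, ho, hinf⟩
    refine ⟨c, ?_, ?_⟩
    · rw [PySem.Set.mem_ofList]
      exact hinf.sublist.subset (by simp)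
    · simp only [pvDoubled, Bool.and_eq_true, Bool.not_eq_true']
      refine ⟨?_, (PySem.Chars.isIn_iff_infix _ _).mpr hinf⟩
      rw [PySem.Chars.isIn_eq_false_iff]
      intro hcin
      have hc : c ∈ ['e', 'o'] := hcin.sublist.subset (by simp)
      simp only [List.mem_cons, List.not_mem_nil, or_false] at hc
      rcases hc with rfl | rfl
      · exact he rfl
      · exact ho rfl

-- ===== VERDICT (by name: the statement is the Claim_ definition above) =====
theorem checkCondition3_spec : Claim_equal_checkCondition3 := by
  intro password _ hpre
  unfold Spec_checkCondition3
  cases h : password.toList with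
  | nil => exact absurd (by rw [← password.toList_eq_nil_iff]; exact h) hpre
  | cons c rest =>
    simp only [checkCondition3, checkCondition3_alt, h]
    by_cases hb : (PySem.Set.ofList (c :: rest)).any (pvDoubled (c :: rest)) = true
    · rw [if_pos hb]
      exact (go_eq_some_false_iff rest c).mpr ((alt_any_iff (c :: rest)).mp hb)
    · rw [if_neg hb]
      have hnb : ¬ HasBadDouble (c :: rest) := fun h => hb ((alt_any_iff (c :: rest)).mpr h)
      cases hgo : checkCondition3Go rest c with
      | none => rfl
      | some b =>
        cases b with
        | false => exact absurd ((go_eq_some_false_iff rest c).mp hgo) hnb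
        | true => exact absurd hgo (go_ne_some_true rest c)
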